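-- pv_equiv track=rewrite | github.com/anushreeberlia/loom | services/retrieval.py | passes_sanity_check
-- ===== SOURCE A (Python) =====
-- ITEM_SUBTYPE_KEYWORDS = {
--     "bottom": ["skirt", "jeans", "trousers", "pants", "shorts", "capris", "leggings", "joggers"],
--     "shoes": ["heels", "flats", "sneakers", "boots", "sandals", "flip flops", "loafers", "pumps", "wedges"],
--     "accessory": ["bag", "handbag", "clutch", "belt", "watch", "earring", "necklace", "pendant", "bracelet", "scarf"],
--     "layer": ["jacket", "blazer", "cardigan", "coat", "sweater", "hoodie", "vest"],
--     "top": ["shirt", "blouse", "t-shirt", "top", "sweater", "tank", "tunic"],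
-- }
--
-- SLOT_EXCLUSIONS = {
--     "bottom": ["stockings", "tights", "swimsuit", "bikini", "bra", "panty", "underwear", "lingerie"],
--     "top": ["bra", "bikini", "swimsuit", "underwear", "lingerie"],
-- }
--
-- FORMALITY_DRESSY = {"heels", "pumps", "clutch", "blazer", "trousers", "pencil", "stilettos", "wedges"}
--
-- FORMALITY_CASUAL = {"sneakers", "flip flops", "joggers", "shorts", "t-shirt", "tank", "sandals", "flats"}
--
-- KIDS_KEYWORDS = {"girl's", "girls", "boy's", "boys", "kid", "kids", "baby", "toddler", "children"}
--
-- def infer_product_type(item_name: str, slot: str) -> dict: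
--     """
--     Infer product type attributes from item name.
--     Returns: {"subtype": "skirt", "formality": "dressy", "audience": "women"}
--     """
--     name_lower = item_name.lower()
--     result = {"subtype": None, "formality": None, "audience": "women"}
--
--     # Get subtype
--     for keyword in ITEM_SUBTYPE_KEYWORDS.get(slot, []):
--         if keyword in name_lower:
--             result["subtype"] = keyword
--             break
--
--     # Infer formality
--     if any(kw in name_lower for kw in FORMALITY_DRESSY):
--         result["formality"] = "dressy"
--     elif any(kw in name_lower for kw in FORMALITY_CASUAL):
--         result["formality"] = "casual"
--     else:
--         result["formality"] = "neutral"
--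
--     # Infer audience
--     if any(kw in name_lower for kw in KIDS_KEYWORDS):
--         result["audience"] = "kids"
--
--     return result
--
-- FORBIDDEN_KEYWORDS = {
--     "swimsuit", "swimwear", "bikini", "swim",
--     "hosiery", "stockings", "tights", "socks",
--     "girl's", "girls", "kid", "kids", "children", "boy",
--     "dupatta", "innerwear", "underwear", "bra", "lingerie",
--     "sleepwear", "nightwear", "pyjama", "pajama",
-- }
--
-- def passes_sanity_check(item: dict, slot: str = None) -> bool:
--     """
--     Check if an item passes the sanity gate.
--
--     Checks:
--     1. No forbidden keywords (swimwear, underwear, etc.)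
--     2. No slot-specific exclusions (stockings in bottom slot)
--     3. Audience must be women (not kids)
--     """
--     name = item.get("name", "").lower()
--
--     # Global forbidden keywords
--     for keyword in FORBIDDEN_KEYWORDS:
--         if keyword in name:
--             return False
--
--     # Slot-specific exclusions
--     if slot and slot in SLOT_EXCLUSIONS:
--         for keyword in SLOT_EXCLUSIONS[slot]:
--             if keyword in name:
--                 return False
--
--     # Audience check - reject kids items
--     product_info = infer_product_type(item.get("name", ""), slot or "")
--     if product_info.get("audience") == "kids":
--         return False
--
--     return True
-- ===== SOURCE B (Python) =====
-- ITEM_SUBTYPE_KEYWORDS = {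
--     "bottom": ["skirt", "jeans", "trousers", "pants", "shorts", "capris", "leggings", "joggers"],
--     "shoes": ["heels", "flats", "sneakers", "boots", "sandals", "flip flops", "loafers", "pumps", "wedges"],
--     "accessory": ["bag", "handbag", "clutch", "belt", "watch", "earring", "necklace", "pendant", "bracelet", "scarf"],
--     "layer": ["jacket", "blazer", "cardigan", "coat", "sweater", "hoodie", "vest"],
--     "top": ["shirt", "blouse", "t-shirt", "top", "sweater", "tank", "tunic"],
-- }
--
-- SLOT_EXCLUSIONS = {
--     "bottom": ["stockings", "tights", "swimsuit", "bikini", "bra", "panty", "underwear", "lingerie"],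
--     "top": ["bra", "bikini", "swimsuit", "underwear", "lingerie"],
-- }
--
-- KIDS_KEYWORDS = {"girl's", "girls", "boy's", "boys", "kid", "kids", "baby", "toddler", "children"}
--
-- FORBIDDEN_KEYWORDS = {
--     "swimsuit", "swimwear", "bikini", "swim",
--     "hosiery", "stockings", "tights", "socks",
--     "girl's", "girls", "kid", "kids", "children", "boy",
--     "dupatta", "innerwear", "underwear", "bra", "lingerie",
--     "sleepwear", "nightwear", "pyjama", "pajama",
-- }
--
--
-- def passes_sanity_check(item: dict, slot: str = None) -> bool:
--     """One unified rejection scan: forbidden + kids + slot exclusions in a single set."""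
--     name = item.get("name", "").lower()
--     banned = FORBIDDEN_KEYWORDS | KIDS_KEYWORDS
--     if slot in SLOT_EXCLUSIONS:
--         banned = banned | set(SLOT_EXCLUSIONS[slot])
--     return all(kw not in name for kw in banned)
-- ===== Notes on version B (the rewrite author's own statement) =====
-- stated objective: simpler
-- what changed: B builds one combined set of banned substrings (forbidden + kids + applicable slot exclusions) and does a single scan over it, replacing A's three sequential rejection passes and the infer_product_type detour whose only used output was the kids-audience flag.
import Mathlib
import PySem

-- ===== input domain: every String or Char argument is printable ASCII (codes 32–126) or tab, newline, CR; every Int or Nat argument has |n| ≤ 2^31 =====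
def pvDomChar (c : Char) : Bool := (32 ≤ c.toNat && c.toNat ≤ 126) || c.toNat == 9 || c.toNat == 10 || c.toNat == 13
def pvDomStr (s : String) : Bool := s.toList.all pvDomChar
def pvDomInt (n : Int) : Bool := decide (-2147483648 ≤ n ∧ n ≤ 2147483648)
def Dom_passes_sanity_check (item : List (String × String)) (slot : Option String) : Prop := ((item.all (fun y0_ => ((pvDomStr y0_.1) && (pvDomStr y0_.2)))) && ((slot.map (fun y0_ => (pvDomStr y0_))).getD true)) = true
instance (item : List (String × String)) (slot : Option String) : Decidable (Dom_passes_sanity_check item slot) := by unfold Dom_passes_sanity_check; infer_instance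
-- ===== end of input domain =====

-- B is a simpler decomposition: one combined banned-substring set and a single scan,
-- replacing A's three sequential rejection passes and the infer_product_type detour.

-- ===== PORT A =====
def ITEM_SUBTYPE_KEYWORDS : PySem.Dict String (List String) := PySem.Dict.ofList [
  ("bottom", ["skirt", "jeans", "trousers", "pants", "shorts", "capris", "leggings", "joggers"]),
  ("shoes", ["heels", "flats", "sneakers", "boots", "sandals", "flip flops", "loafers", "pumps", "wedges"]),
  ("accessory", ["bag", "handbag", "clutch", "belt", "watch", "earring", "necklace", "pendant", "bracelet", "scarf"]),
  ("layer", ["jacket", "blazer", "cardigan", "coat", "sweater", "hoodie", "vest"]),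
  ("top", ["shirt", "blouse", "t-shirt", "top", "sweater", "tank", "tunic"])]

def SLOT_EXCLUSIONS : PySem.Dict String (List String) := PySem.Dict.ofList [
  ("bottom", ["stockings", "tights", "swimsuit", "bikini", "bra", "panty", "underwear", "lingerie"]),
  ("top", ["bra", "bikini", "swimsuit", "underwear", "lingerie"])]

def FORMALITY_DRESSY : PySem.Set String := PySem.Set.ofList
  ["heels", "pumps", "clutch", "blazer", "trousers", "pencil", "stilettos", "wedges"]

def FORMALITY_CASUAL : PySem.Set String := PySem.Set.ofList
  ["sneakers", "flip flops", "joggers", "shorts", "t-shirt", "tank", "sandals", "flats"]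

def KIDS_KEYWORDS : PySem.Set String := PySem.Set.ofList
  ["girl's", "girls", "boy's", "boys", "kid", "kids", "baby", "toddler", "children"]

def FORBIDDEN_KEYWORDS : PySem.Set String := PySem.Set.ofList
  ["swimsuit", "swimwear", "bikini", "swim",
   "hosiery", "stockings", "tights", "socks",
   "girl's", "girls", "kid", "kids", "children", "boy",
   "dupatta", "innerwear", "underwear", "bra", "lingerie",
   "sleepwear", "nightwear", "pyjama", "pajama"]

-- the 'for keyword … : result["subtype"] = keyword; break' loop of infer_product_type
def inferSubLoop (nameLower : String) (kws : List String) (d : PySem.Dict String (Option String)) : PySem.Dict String (Option String) :=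
  match kws with
  | [] => d
  | k :: rest => if PySem.Str.isIn k nameLower then d.insert "subtype" (some k) else inferSubLoop nameLower rest d

def infer_product_type (item_name : String) (slot : String) : PySem.Dict String (Option String) :=
  let nameLower := PySem.Str.lower item_name
  let result : PySem.Dict String (Option String) :=
    PySem.Dict.ofList [("subtype", none), ("formality", none), ("audience", some "women")]
  let result := inferSubLoop nameLower (ITEM_SUBTYPE_KEYWORDS.getD slot []) result
  let result :=
    if FORMALITY_DRESSY.any (fun kw => PySem.Str.isIn kw nameLower) then result.insert "formality" (some "dressy")
    else if FORMALITY_CASUAL.any (fun kw => PySem.Str.isIn kw nameLower) then result.insert "formality" (some "casual")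
    else result.insert "formality" (some "neutral")
  let result :=
    if KIDS_KEYWORDS.any (fun kw => PySem.Str.isIn kw nameLower) then result.insert "audience" (some "kids")
    else result
  result

def passes_sanity_check (item : List (String × String)) (slot : Option String) : Bool :=
  let name := PySem.Str.lower ((PySem.Dict.ofList item).getD "name" "")
  if FORBIDDEN_KEYWORDS.any (fun kw => PySem.Str.isIn kw name) then false
  else if (match slot with
           | none => false
           | some s => decide (s ≠ "") && SLOT_EXCLUSIONS.contains s)
          && (SLOT_EXCLUSIONS.getD (slot.getD "") []).any (fun kw => PySem.Str.isIn kw name) then false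
  else
    let product_info := infer_product_type ((PySem.Dict.ofList item).getD "name" "") (slot.getD "")
    if product_info.getD "audience" none == some "kids" then false
    else true

-- ===== PORT B =====
def passes_sanity_check_alt (item : List (String × String)) (slot : Option String) : Bool :=
  let name := PySem.Str.lower ((PySem.Dict.ofList item).getD "name" "")
  let banned : PySem.Set String := PySem.Set.union FORBIDDEN_KEYWORDS KIDS_KEYWORDS
  let banned :=
    match slot with
    | some s => if SLOT_EXCLUSIONS.contains s then PySem.Set.union banned (PySem.Set.ofList (SLOT_EXCLUSIONS.getD s [])) else banned
    | none => banned
  banned.all (fun kw => !(PySem.Str.isIn kw name))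

-- ===== PRECONDITION & SPEC =====
def Spec_passes_sanity_check (item : List (String × String)) (slot : Option String) (out : Bool) : Prop := out = passes_sanity_check_alt item slot
instance (item : List (String × String)) (slot : Option String) (out : Bool) : Decidable (Spec_passes_sanity_check item slot out) := by unfold Spec_passes_sanity_check; infer_instance

-- ===== CLAIM (what is proved, stated in full; the proofs are below) =====
def Claim_equal_passes_sanity_check : Prop := ∀ (item : List (String × String)) (slot : Option String), Dom_passes_sanity_check item slot → Spec_passes_sanity_check item slot (passes_sanity_check item slot)

-- ===== LEMMAS AND PROOFS =====

lemma inferSubLoop_audience (nl : String) (kws : List String) (d : PySem.Dict String (Option String)) :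
    (inferSubLoop nl kws d).getD "audience" none = d.getD "audience" none := by
  induction kws with
  | nil => rfl
  | cons k rest ih =>
    simp only [inferSubLoop]
    split
    · rw [PySem.Dict.getD_insert]; simp
    · exact ih

lemma infer_audience (n s : String) :
    (infer_product_type n s).getD "audience" none =
      (if KIDS_KEYWORDS.any (fun kw => PySem.Str.isIn kw (PySem.Str.lower n)) then some "kids" else some "women") := by
  unfold infer_product_type
  dsimp only
  split
  · rw [PySem.Dict.getD_insert]; simp
  · split <;> [skip; split] <;>
      (rw [PySem.Dict.getD_insert]; simp [inferSubLoop_audience]; rfl)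

lemma setAllNot (st : List String) (n : String) :
    st.all (fun kw => !(PySem.Str.isIn kw n)) = !(st.any (fun kw => PySem.Str.isIn kw n)) := by
  rw [Bool.eq_iff_iff]
  simp [List.all_eq_true]

lemma union_any (s t : PySem.Set String) (q : String → Bool) :
    (PySem.Set.union s t).any q = (s.any q || t.any q) := by
  rw [Bool.eq_iff_iff]
  simp only [List.any_eq_true, PySem.Set.mem_union, Bool.or_eq_true]
  constructor
  · rintro ⟨x, h | h, hq⟩
    · exact Or.inl ⟨x, h, hq⟩
    · exact Or.inr ⟨x, h, hq⟩
  · rintro (⟨x, h, hq⟩ | ⟨x, h, hq⟩)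
    · exact ⟨x, Or.inl h, hq⟩
    · exact ⟨x, Or.inr h, hq⟩

lemma ofList_any (E : List String) (q : String → Bool) :
    (PySem.Set.ofList E).any q = E.any q := by
  rw [Bool.eq_iff_iff]
  simp [List.any_eq_true, PySem.Set.mem_ofList]

-- ===== VERDICT (by name: the statement is the Claim_ definition above) =====
theorem passes_sanity_check_spec : Claim_equal_passes_sanity_check := by
  intro item slot _
  unfold Spec_passes_sanity_check passes_sanity_check passes_sanity_check_alt
  dsimp only
  cases slot with
  | none =>
      simp only [Option.getD, setAllNot, union_any, infer_audience, Bool.false_and]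
      split_ifs <;> simp_all <;> tauto
  | some s =>
      dsimp only
      by_cases hc : SLOT_EXCLUSIONS.contains s = true
      · have hs : (decide (s ≠ "") : Bool) = true := by
          refine decide_eq_true ?_; rintro rfl; revert hc; decide
        simp only [Option.getD, setAllNot, union_any, ofList_any, infer_audience, hc, hs,
          if_true, Bool.true_and]
        split_ifs <;> simp_all <;> tauto
      · rw [Bool.not_eq_true] at hc
        rw [if_neg (show ¬(SLOT_EXCLUSIONS.contains s = true) by simp [hc])]
        simp only [Option.getD, setAllNot, union_any, infer_audience, hc,
          Bool.and_false, Bool.false_and, Bool.false_eq_true, if_false]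
        split_ifs <;> simp_all <;> tauto
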